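-- pv_equiv track=rewrite | github.com/ostaninanastya/barbershop | python_oracle_crud/api/commons_.py | get_filter
-- ===== SOURCE A (Python) =====
-- def get_str(value):
--     return "'"+str(value)+"'"
--
-- def get_filter(params, field_names):
--     filter = ""
--     for i in range(len(params)):
--         if (params[i] == None):
--             continue
--         if filter != "":
--             filter += " AND "
--         filter += field_names[i] + " = " + get_str(params[i])
--     return filter
-- ===== SOURCE B (Python) =====
-- def get_str(value):
--     return "'"+str(value)+"'"
--
-- def get_filter(params, field_names):
--     def go(lo, hi):
--         if hi - lo == 0:
--             return ""
--         if hi - lo == 1: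
--             if params[lo] is None:
--                 return ""
--             return field_names[lo] + " = " + get_str(params[lo])
--         mid = (lo + hi) // 2
--         left = go(lo, mid)
--         right = go(mid, hi)
--         if left == "":
--             return right
--         if right == "":
--             return left
--         return left + " AND " + right
--     return go(0, len(params))
-- ===== Notes on version B (the rewrite author's own statement) =====
-- stated objective: alternative
-- what changed: B replaces A's left-to-right accumulator loop with its sentinel 'if filter != ""' separator branch by a divide-and-conquer over the index range: it recursively builds the filter of each half and joins the two halves with ' AND ' only when both are non-empty (correct because the ' AND '-separated join of non-empty clauses is an associative concatenation).
import Mathlib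
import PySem

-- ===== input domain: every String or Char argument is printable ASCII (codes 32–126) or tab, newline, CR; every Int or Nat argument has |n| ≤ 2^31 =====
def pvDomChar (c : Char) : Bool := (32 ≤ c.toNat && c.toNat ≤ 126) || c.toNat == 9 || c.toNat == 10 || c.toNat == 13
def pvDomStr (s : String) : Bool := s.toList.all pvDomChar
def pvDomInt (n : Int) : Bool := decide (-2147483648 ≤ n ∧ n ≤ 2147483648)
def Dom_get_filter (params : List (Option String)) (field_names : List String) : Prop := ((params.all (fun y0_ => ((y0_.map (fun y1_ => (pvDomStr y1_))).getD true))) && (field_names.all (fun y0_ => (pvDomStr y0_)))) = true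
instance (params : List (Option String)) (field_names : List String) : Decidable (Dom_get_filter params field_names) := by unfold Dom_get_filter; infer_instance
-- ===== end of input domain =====

-- B replaces A's accumulator loop with its sentinel separator branch by a divide-and-conquer join over the index range (alternative; same result).


-- ===== PORT A =====
def get_str (value : String) : String := "'" ++ value ++ "'"

-- the body of A's for-loop over i in range(len(params))
def filterStep (params : List (Option String)) (field_names : List String) (filter : String) (i : Int) : String :=
  match PySem.List.pyGetD params i none with   -- params[i]; i ∈ range(len(params)) is always in range
  | none => filter                             -- continue
  | some v =>
    (if filter ≠ "" then filter ++ " AND " else filter)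
      ++ PySem.List.pyGetD field_names i "" ++ " = " ++ get_str v
      -- field_names[i]: Python raises IndexError when i ≥ len(field_names); Pre_ excludes that

def get_filter (params : List (Option String)) (field_names : List String) : String :=
  (PySem.List.pyRange 0 (params.length : Int) 1).foldl (filterStep params field_names) ""

-- ===== PORT B =====
-- B's inner 'go(lo, hi)': lo, hi are always the non-negative bounds 0 ≤ lo ≤ hi ≤ len(params),
-- so Nat indices carry the same values and '//2' on them is Nat division (exact here).
-- params[lo] is always in range at the call sites; field_names[lo] raises in Python exactly
-- when lo ≥ len(field_names) — excluded by Pre_, ported as getD "".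
def goDC (ps : List (Option String)) (fs : List String) (lo hi : Nat) : String :=
  if hi - lo = 0 then ""
  else if hi - lo = 1 then
    match PySem.List.pyGetD ps (lo : Int) none with
    | none => ""
    | some v => PySem.List.pyGetD fs (lo : Int) "" ++ " = " ++ get_str v
  else
    let mid := (lo + hi) / 2
    let left := goDC ps fs lo mid
    let right := goDC ps fs mid hi
    if left = "" then right
    else if right = "" then left
    else left ++ " AND " ++ right
termination_by hi - lo
decreasing_by all_goals omega

def get_filter_alt (params : List (Option String)) (field_names : List String) : String :=
  goDC params field_names 0 params.length

-- ===== PRECONDITION & SPEC =====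
-- Pre_ excludes exactly the inputs on which Python A raises IndexError: some params entry beyond
-- len(field_names) is not None (then field_names[i] is accessed out of range); B raises there too.
def Pre_get_filter (params : List (Option String)) (field_names : List String) : Prop :=
  (params.drop field_names.length).all (fun p => p.isNone) = true
instance (params : List (Option String)) (field_names : List String) : Decidable (Pre_get_filter params field_names) := by unfold Pre_get_filter; infer_instance

def pvWitness_get_filter : List (Option String) × List String :=
  ([some "Ivan", none, some "Main st."], ["name", "age", "address"])

def Spec_get_filter (params : List (Option String)) (field_names : List String) (out : String) : Prop := out = get_filter_alt params field_names
instance (params : List (Option String)) (field_names : List String) (out : String) : Decidable (Spec_get_filter params field_names out) := by unfold Spec_get_filter; infer_instance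

-- ===== CLAIM (what is proved, stated in full; the proofs are below) =====
def Claim_equal_get_filter : Prop := ∀ (params : List (Option String)) (field_names : List String), Dom_get_filter params field_names → Pre_get_filter params field_names → Spec_get_filter params field_names (get_filter params field_names)

-- ===== LEMMAS AND PROOFS =====

-- the clauses A emits, in A's zip shape (truncating at the shorter list)
def clausesOf (ps : List (Option String)) (fs : List String) : List String :=
  (ps.zip fs).filterMap (fun pf => pf.1.map (fun v => pf.2 ++ " = " ++ get_str v))

-- the clauses of the index range [lo, hi) — what B's go(lo, hi) joins
def clausesIdx (ps : List (Option String)) (fs : List String) (lo hi : Nat) : List String :=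
  (List.range' lo (hi - lo)).filterMap
    (fun i => (ps.getD i none).map (fun v => fs.getD i "" ++ " = " ++ get_str v))

-- A's per-clause accumulator step, abstracted from filterStep
def stepA (a c : String) : String := (if a ≠ "" then a ++ " AND " else a) ++ c

lemma fsTail_getD (fs : List String) (k : Nat) : fs.getD (k + 1) "" = fs.tail.getD k "" := by
  cases fs <;> simp

lemma loopA_cons (p : Option String) (ps : List (Option String)) (fs : List String) (acc : String) :
    (PySem.List.pyRange 0 ((p :: ps).length : Int) 1).foldl (filterStep (p :: ps) fs) acc
    = (PySem.List.pyRange 0 (ps.length : Int) 1).foldl (filterStep ps fs.tail) (filterStep (p :: ps) fs acc 0) := by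
  rw [PySem.List.pyRange_zero_nat, PySem.List.pyRange_zero_nat,
    show (p :: ps).length = ps.length + 1 from rfl, List.range_succ_eq_map]
  simp only [List.map_cons, List.foldl_cons, List.map_map, List.foldl_map, Nat.cast_zero]
  congr 1
  funext a k
  show filterStep (p :: ps) fs a ((k + 1 : Nat) : Int) = filterStep ps fs.tail a (k : Int)
  simp only [filterStep, PySem.List.pyGetD_natCast, List.getD_cons_succ, fsTail_getD]

lemma loopA_eq_clauses : ∀ (ps : List (Option String)) (fs : List String) (acc : String),
    Pre_get_filter ps fs →
    (PySem.List.pyRange 0 (ps.length : Int) 1).foldl (filterStep ps fs) acc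
    = (clausesOf ps fs).foldl stepA acc := by
  intro ps
  induction ps with
  | nil => intro fs acc _; simp [clausesOf]
  | cons p ps ih =>
    intro fs acc hpre
    rw [loopA_cons]
    cases p with
    | none =>
      have h0 : filterStep (none :: ps) fs acc 0 = acc := by
        simp [filterStep, PySem.List.pyGetD_zero_cons]
      rw [h0]
      cases fs with
      | nil =>
        have hpre' : Pre_get_filter ps [] := by
          simp only [Pre_get_filter, List.length_nil, List.drop_zero, List.all_cons,
            Bool.and_eq_true] at hpre
          simpa only [Pre_get_filter, List.length_nil, List.drop_zero] using hpre.2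
        rw [show (([] : List String).tail = []) from rfl, ih [] acc hpre']
        simp [clausesOf]
      | cons f fs' =>
        have hpre' : Pre_get_filter ps fs' := by
          simpa only [Pre_get_filter, List.length_cons, List.drop_succ_cons] using hpre
        rw [show ((f :: fs').tail = fs') from rfl, ih fs' acc hpre']
        simp [clausesOf]
    | some v =>
      cases fs with
      | nil =>
        exfalso
        simp [Pre_get_filter] at hpre
      | cons f fs' =>
        have hpre' : Pre_get_filter ps fs' := by
          simpa only [Pre_get_filter, List.length_cons, List.drop_succ_cons] using hpre
        have h0 : filterStep (some v :: ps) (f :: fs') acc 0 = stepA acc (f ++ " = " ++ get_str v) := by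
          simp [filterStep, stepA, PySem.List.pyGetD_zero_cons, String.append_assoc]
        rw [h0, show ((f :: fs').tail = fs') from rfl, ih fs' _ hpre']
        have hcl : clausesOf (some v :: ps) (f :: fs') = (f ++ " = " ++ get_str v) :: clausesOf ps fs' := by
          simp [clausesOf]
        rw [hcl, List.foldl_cons]

lemma toList_ne_nil_iff (s : String) : s ≠ "" ↔ s.toList ≠ [] := by
  constructor
  · intro h hl; exact h (String.toList_inj.mp (by simpa using hl))
  · intro h hs; exact h (by rw [hs]; rfl)

lemma clause_shape_ne_empty (f v : String) : f ++ " = " ++ get_str v ≠ "" := by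
  rw [toList_ne_nil_iff _]
  simp [get_str]

lemma clausesIdx_ne_empty (ps : List (Option String)) (fs : List String) (lo hi : Nat) :
    ∀ c ∈ clausesIdx ps fs lo hi, c ≠ "" := by
  intro c hc
  simp only [clausesIdx, List.mem_filterMap] at hc
  obtain ⟨i, _, hmap⟩ := hc
  cases h : ps.getD i none with
  | none => rw [h] at hmap; simp at hmap
  | some v =>
    rw [h] at hmap
    simp only [Option.map_some, Option.some_inj] at hmap
    rw [← hmap]
    exact clause_shape_ne_empty _ _

lemma clause_ne_empty (ps : List (Option String)) (fs : List String) :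
    ∀ c ∈ clausesOf ps fs, c ≠ "" := by
  intro c hc
  simp only [clausesOf, List.mem_filterMap] at hc
  obtain ⟨⟨p, f⟩, _, hmap⟩ := hc
  cases p with
  | none => simp at hmap
  | some v =>
    simp only [Option.map_some, Option.some_inj] at hmap
    rw [← hmap]
    exact clause_shape_ne_empty _ _

lemma join_cons_ne_empty (d : String) (ds : List String) (hd : d ≠ "") :
    PySem.Str.join " AND " (d :: ds) ≠ "" := by
  rw [toList_ne_nil_iff _]
  cases ds with
  | nil => simp [PySem.Str.toList_join, PySem.Chars.join_singleton, (toList_ne_nil_iff d).mp hd]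
  | cons e es => simp [PySem.Str.toList_join, PySem.Chars.join_cons_cons, (toList_ne_nil_iff d).mp hd]

lemma join_nil_str : PySem.Str.join " AND " ([] : List String) = "" := by
  apply String.toList_inj.mp
  simp [PySem.Str.toList_join, PySem.Chars.join_nil]

lemma join_eq_empty_iff (cs : List String) (h : ∀ c ∈ cs, c ≠ "") :
    PySem.Str.join " AND " cs = "" ↔ cs = [] := by
  cases cs with
  | nil => simp [join_nil_str]
  | cons d ds =>
    simp only [iff_false, reduceCtorEq]
    exact join_cons_ne_empty d ds (h d List.mem_cons_self)

-- " AND "-join of two non-empty blocks of non-empty clauses concatenates with one separator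
lemma join_append (xs : List String) : ∀ (ys : List String), xs ≠ [] → ys ≠ [] →
    PySem.Str.join " AND " (xs ++ ys)
    = PySem.Str.join " AND " xs ++ " AND " ++ PySem.Str.join " AND " ys := by
  induction xs with
  | nil => intro ys hx _; exact absurd rfl hx
  | cons x xs ih =>
    intro ys _ hy
    cases xs with
    | nil =>
      cases ys with
      | nil => exact absurd rfl hy
      | cons y ys' =>
        apply String.toList_inj.mp
        simp [PySem.Str.toList_join, PySem.Chars.join_singleton, PySem.Chars.join_cons_cons]
    | cons x2 xs' =>
      have hmid := ih ys (by simp) hy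
      apply String.toList_inj.mp
      have h1 : ((x :: x2 :: xs') ++ ys) = x :: ((x2 :: xs') ++ ys) := rfl
      rw [h1]
      have h2 : (x2 :: xs') ++ ys = x2 :: (xs' ++ ys) := rfl
      have hcc : PySem.Str.join " AND " (x :: x2 :: (xs' ++ ys))
          = x ++ " AND " ++ PySem.Str.join " AND " (x2 :: (xs' ++ ys)) := by
        apply String.toList_inj.mp
        simp [PySem.Str.toList_join, PySem.Chars.join_cons_cons, List.append_assoc]
      rw [h2, hcc, ← h2, hmid]
      have hcc2 : PySem.Str.join " AND " (x :: x2 :: xs')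
          = x ++ " AND " ++ PySem.Str.join " AND " (x2 :: xs') := by
        apply String.toList_inj.mp
        simp [PySem.Str.toList_join, PySem.Chars.join_cons_cons, List.append_assoc]
      rw [hcc2]
      simp [List.append_assoc]

lemma clausesIdx_split (ps : List (Option String)) (fs : List String) (lo mid hi : Nat)
    (h1 : lo ≤ mid) (h2 : mid ≤ hi) :
    clausesIdx ps fs lo hi = clausesIdx ps fs lo mid ++ clausesIdx ps fs mid hi := by
  unfold clausesIdx
  have h := List.range'_append_1 (s := lo) (m := mid - lo) (n := hi - mid)
  rw [show lo + (mid - lo) = mid by omega, show mid - lo + (hi - mid) = hi - lo by omega] at h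
  rw [← h, List.filterMap_append]

-- B's divide-and-conquer computes the " AND "-join of its index range's clauses
lemma goDC_eq_join (ps : List (Option String)) (fs : List String) :
    ∀ (lo hi : Nat), goDC ps fs lo hi = PySem.Str.join " AND " (clausesIdx ps fs lo hi) := by
  intro lo hi
  induction' hn : hi - lo using Nat.strong_induction_on with n ihn generalizing lo hi
  rw [goDC]
  by_cases h0 : hi - lo = 0
  · rw [if_pos h0]
    unfold clausesIdx
    rw [h0]
    simp [join_nil_str]
  · rw [if_neg h0]
    by_cases h1 : hi - lo = 1
    · rw [if_pos h1]
      unfold clausesIdx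
      rw [h1, List.range'_one, List.filterMap_cons, PySem.List.pyGetD_natCast,
        PySem.List.pyGetD_natCast]
      cases ps.getD lo none with
      | none => simp [join_nil_str]
      | some v =>
        simp only [Option.map_some]
        apply String.toList_inj.mp
        simp [PySem.Str.toList_join, PySem.Chars.join_singleton]
    · rw [if_neg h1]
      have hml : lo < (lo + hi) / 2 := by omega
      have hmh : (lo + hi) / 2 < hi := by omega
      have hl := ihn ((lo + hi) / 2 - lo) (by omega) lo ((lo + hi) / 2) rfl
      have hr := ihn (hi - (lo + hi) / 2) (by omega) ((lo + hi) / 2) hi rfl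
      simp only []
      rw [hl, hr, clausesIdx_split ps fs lo ((lo + hi) / 2) hi (by omega) (by omega)]
      have hneL := clausesIdx_ne_empty ps fs lo ((lo + hi) / 2)
      have hneR := clausesIdx_ne_empty ps fs ((lo + hi) / 2) hi
      by_cases hL : clausesIdx ps fs lo ((lo + hi) / 2) = []
      · rw [hL]
        simp [join_nil_str]
      · rw [if_neg (by rw [join_eq_empty_iff _ hneL]; exact hL)]
        by_cases hR : clausesIdx ps fs ((lo + hi) / 2) hi = []
        · rw [hR]
          simp [join_nil_str]
        · rw [if_neg (by rw [join_eq_empty_iff _ hneR]; exact hR),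
            join_append _ _ hL hR]

lemma shift_range'_filterMap {α : Type} (F : Nat → Option α) (n : Nat) :
    (List.range' 1 n).filterMap F = (List.range' 0 n).filterMap (fun i => F (i + 1)) := by
  rw [List.range'_eq_map_range (s := 1) (n := n), List.range'_eq_map_range (s := 0) (n := n),
    List.filterMap_map, List.filterMap_map]
  apply List.filterMap_congr
  intro i _
  simp [Nat.add_comm]

-- under Pre_, B's index-range clauses of the whole range are exactly A's zip clauses
lemma clauses_bridge : ∀ (ps : List (Option String)) (fs : List String),
    Pre_get_filter ps fs → clausesIdx ps fs 0 ps.length = clausesOf ps fs := by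
  intro ps
  induction ps with
  | nil => intro fs _; rfl
  | cons p ps ih =>
    intro fs hpre
    unfold clausesIdx
    rw [show (p :: ps).length - 0 = ps.length + 1 by simp, List.range'_succ, List.filterMap_cons]
    have hshift := shift_range'_filterMap
      (fun i => ((p :: ps).getD i none).map (fun v => fs.getD i "" ++ " = " ++ get_str v)) ps.length
    rw [hshift]
    have hbody : (fun i => (((p :: ps).getD (i + 1) none).map
        (fun v => fs.getD (i + 1) "" ++ " = " ++ get_str v)))
        = (fun i => ((ps.getD i none).map (fun v => fs.tail.getD i "" ++ " = " ++ get_str v))) := by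
      funext i
      rw [List.getD_cons_succ, fsTail_getD]
    rw [hbody]
    have htail : (List.range' 0 ps.length).filterMap
        (fun i => ((ps.getD i none).map (fun v => fs.tail.getD i "" ++ " = " ++ get_str v)))
        = clausesIdx ps fs.tail 0 ps.length := by
      unfold clausesIdx
      rw [show ps.length - 0 = ps.length by simp]
    rw [htail]
    cases p with
    | none =>
      simp only [List.getD_cons_zero, Option.map_none]
      cases fs with
      | nil =>
        have hpre' : Pre_get_filter ps [] := by
          simp only [Pre_get_filter, List.length_nil, List.drop_zero, List.all_cons,
            Bool.and_eq_true] at hpre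
          simpa only [Pre_get_filter, List.length_nil, List.drop_zero] using hpre.2
        rw [show (([] : List String).tail = []) from rfl, ih [] hpre']
        simp [clausesOf]
      | cons f fs' =>
        have hpre' : Pre_get_filter ps fs' := by
          simpa only [Pre_get_filter, List.length_cons, List.drop_succ_cons] using hpre
        rw [show ((f :: fs').tail = fs') from rfl, ih fs' hpre']
        simp [clausesOf]
    | some v =>
      cases fs with
      | nil =>
        exfalso
        simp [Pre_get_filter] at hpre
      | cons f fs' =>
        have hpre' : Pre_get_filter ps fs' := by
          simpa only [Pre_get_filter, List.length_cons, List.drop_succ_cons] using hpre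
        rw [show ((f :: fs').tail = fs') from rfl, ih fs' hpre']
        simp [clausesOf]

lemma stepA_join (cs : List String) : ∀ (acc : String), acc ≠ "" → (∀ c ∈ cs, c ≠ "") →
    cs.foldl stepA acc = PySem.Str.join " AND " (acc :: cs) := by
  induction cs with
  | nil =>
    intro acc _ _
    apply String.toList_inj.mp
    simp [PySem.Str.toList_join, PySem.Chars.join_singleton]
  | cons c cs ih =>
    intro acc hacc hcs
    have hstep : stepA acc c = acc ++ " AND " ++ c := by simp [stepA, if_pos hacc]
    have hne : acc ++ " AND " ++ c ≠ "" := by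
      rw [toList_ne_nil_iff _]
      simp [(toList_ne_nil_iff acc).mp hacc]
    rw [List.foldl_cons, hstep, ih _ hne (fun d hd => hcs d (List.mem_cons_of_mem _ hd))]
    apply String.toList_inj.mp
    cases cs with
    | nil =>
      simp [PySem.Str.toList_join, PySem.Chars.join_singleton, PySem.Chars.join_cons_cons]
    | cons d ds =>
      simp [PySem.Str.toList_join, PySem.Chars.join_cons_cons, List.append_assoc]

-- ===== VERDICT (by name: the statement is the Claim_ definition above) =====
theorem get_filter_spec : Claim_equal_get_filter := by
  intro params field_names _ hpre
  show get_filter params field_names = get_filter_alt params field_names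
  rw [get_filter, loopA_eq_clauses params field_names "" hpre, get_filter_alt,
    goDC_eq_join params field_names 0 params.length, clauses_bridge params field_names hpre]
  cases hcl : clausesOf params field_names with
  | nil => simp [join_nil_str]
  | cons c cs =>
    have hne : ∀ d ∈ clausesOf params field_names, d ≠ "" := clause_ne_empty params field_names
    rw [hcl] at hne
    have h0 : stepA "" c = c := by simp [stepA]
    rw [List.foldl_cons, h0,
      stepA_join cs c (hne c (List.mem_cons_self)) (fun d hd => hne d (List.mem_cons_of_mem _ hd))]
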